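-- pv_equiv track=rewrite | github.com/SamuelmdLow/EdmontonCityCouncilFeed | main.py | checkMotion
-- ===== SOURCE A (Python) =====
-- def checkMotion(elems):
--     terms = ["be read a first time", "be read a second time", "be considered for third reading", "be read a third time", "That the minutes from the following meetings be approved", "That the Public Hearing on", "City Council meeting agenda be adopted"]
--     important = []
--     for elem in elems:
--         good = True
--         for term in terms:
--             if term in elem:
--                 good = False
--                 break
--         if good == True:
--             important.append(elem)
--
--     return important
-- ===== SOURCE B (Python) =====
-- TERMS = ["be read a first time", "be read a second time", "be considered for third reading", "be read a third time", "That the minutes from the following meetings be approved", "That the Public Hearing on", "City Council meeting agenda be adopted"]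
--
-- # Index the banned terms by their first character once; then scan each element
-- # position by position, testing only the terms whose first character matches
-- # the character at that position (naive multi-pattern matching with a
-- # first-character bucket index, instead of one full substring search per term).
-- FIRST = {}
-- for _t in TERMS:
--     FIRST[_t[0]] = FIRST.get(_t[0], []) + [_t]
--
-- def checkMotion(elems):
--     def banned(s):
--         for i, ch in enumerate(s):
--             for t in FIRST.get(ch, []):
--                 if s.startswith(t, i):
--                     return True
--         return False
--     out = []
--     for elem in elems:
--         if not banned(elem):
--             out.append(elem)
--     return out
-- ===== Notes on version B (the rewrite author's own statement) =====
-- stated objective: alternative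
-- what changed: Replaces the per-term substring loop by naive multi-pattern matching: the seven banned terms are indexed once in a dict keyed by their first character, and each element is scanned position by position, testing startswith only for the terms whose first character equals the character at that position.
import Mathlib
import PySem

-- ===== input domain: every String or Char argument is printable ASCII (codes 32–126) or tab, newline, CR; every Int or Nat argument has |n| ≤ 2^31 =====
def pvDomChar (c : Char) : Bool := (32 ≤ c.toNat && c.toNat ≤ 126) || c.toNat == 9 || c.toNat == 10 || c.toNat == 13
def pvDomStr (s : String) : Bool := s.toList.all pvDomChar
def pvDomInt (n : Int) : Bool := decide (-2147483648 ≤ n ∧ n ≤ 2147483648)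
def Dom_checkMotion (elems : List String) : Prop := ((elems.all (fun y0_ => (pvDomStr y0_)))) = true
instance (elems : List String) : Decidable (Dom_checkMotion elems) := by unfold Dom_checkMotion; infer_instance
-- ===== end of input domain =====

-- B replaces the per-term substring loop by naive multi-pattern matching: the banned
-- terms are indexed once by first character and each element is scanned position by
-- position, testing only the terms whose first character matches; alternative structure.

def pvTerms : List String :=
  ["be read a first time", "be read a second time", "be considered for third reading",
   "be read a third time", "That the minutes from the following meetings be approved",
   "That the Public Hearing on", "City Council meeting agenda be adopted"]

-- ===== PORT A =====
-- inner 'for term in terms: if term in elem: good = False; break'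
def pvGoodLoop (terms : List String) (elem : String) : Bool :=
  match terms with
  | [] => true
  | t :: ts => if PySem.Str.isIn t elem then false else pvGoodLoop ts elem

def checkMotion (elems : List String) : List String :=
  elems.foldl (fun important elem =>
    let good := pvGoodLoop pvTerms elem
    if good = true then important ++ [elem] else important) []

-- ===== PORT B =====
-- 'FIRST[t[0]] = FIRST.get(t[0], []) + [t]'  (t[0] = head of the nonempty literal term)
def pvFirst : PySem.Dict Char (List String) :=
  pvTerms.foldl (fun d t => d.insert t.toList.headI (d.getD t.toList.headI [] ++ [t]))
    PySem.Dict.empty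

-- 'for i, ch in enumerate(s): for t in FIRST.get(ch, []): if s.startswith(t, i): return True'
-- s.startswith(t, i) is exactly: t.toList is a prefix of s.toList.drop i, i.e. of the
-- current suffix c :: rest; the recursion walks the suffixes of s.
def pvBanned (cs : List Char) : Bool :=
  match cs with
  | [] => false
  | c :: rest =>
      if (pvFirst.getD c []).any (fun t => t.toList.isPrefixOf (c :: rest)) then true
      else pvBanned rest

def checkMotion_alt (elems : List String) : List String :=
  elems.foldl (fun out elem =>
    if !pvBanned elem.toList then out ++ [elem] else out) []

-- ===== PRECONDITION & SPEC =====
def Spec_checkMotion (elems : List String) (out : List String) : Prop := out = checkMotion_alt elems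
instance (elems : List String) (out : List String) : Decidable (Spec_checkMotion elems out) := by unfold Spec_checkMotion; infer_instance

-- ===== CLAIM (what is proved, stated in full; the proofs are below) =====
def Claim_equal_checkMotion : Prop := ∀ (elems : List String), Dom_checkMotion elems → Spec_checkMotion elems (checkMotion elems)

-- ===== LEMMAS AND PROOFS =====

-- the first-character index, evaluated once
theorem pvFirst_eq : pvFirst = PySem.Dict.mk
    [('b', ["be read a first time", "be read a second time", "be considered for third reading",
            "be read a third time"]),
     ('T', ["That the minutes from the following meetings be approved", "That the Public Hearing on"]),
     ('C', ["City Council meeting agenda be adopted"])] := by decide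

theorem pvFirst_getD (c : Char) : pvFirst.getD c [] =
    if c = 'b' then
      ["be read a first time", "be read a second time", "be considered for third reading",
       "be read a third time"]
    else if c = 'T' then
      ["That the minutes from the following meetings be approved", "That the Public Hearing on"]
    else if c = 'C' then
      ["City Council meeting agenda be adopted"]
    else [] := by
  rw [pvFirst_eq]
  simp only [PySem.Dict.getD, PySem.Dict.get?_mk_cons, beq_iff_eq]
  rcases eq_or_ne c 'b' with hb | hb <;> rcases eq_or_ne c 'T' with hT | hT <;>
    rcases eq_or_ne c 'C' with hC | hC <;> simp_all [eq_comm, PySem.Dict.get?]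

-- a pattern whose first character differs cannot match at this position
theorem prefix_head_ne {d c : Char} {ds cs : List Char} (h : d ≠ c) :
    (d :: ds).isPrefixOf (c :: cs) = false := by
  simp [List.isPrefixOf, h]

-- at each position, testing only the matching bucket tests all terms
theorem bucket_any (c : Char) (cs : List Char) :
    (pvFirst.getD c []).any (fun t => t.toList.isPrefixOf (c :: cs))
      = pvTerms.any (fun t => t.toList.isPrefixOf (c :: cs)) := by
  rw [pvFirst_getD]
  rcases eq_or_ne c 'b' with hb | hb
  · subst hb; simp [pvTerms, prefix_head_ne]
  · rcases eq_or_ne c 'T' with hT | hT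
    · subst hT; simp [hb, pvTerms, prefix_head_ne]
    · rcases eq_or_ne c 'C' with hC | hC
      · subst hC; simp [hb, hT, pvTerms, prefix_head_ne]
      · simp [hb, hT, hC, pvTerms,
          prefix_head_ne (Ne.symm hb), prefix_head_ne (Ne.symm hT), prefix_head_ne (Ne.symm hC)]

-- the position-major scan finds exactly the elements with a term matching at some position
theorem pvBanned_iff (cs : List Char) :
    pvBanned cs = true ↔ ∃ t ∈ pvTerms, ∃ j, t.toList <+: cs.drop j := by
  induction cs with
  | nil => simp [pvBanned, pvTerms]
  | cons c rest ih =>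
      rw [pvBanned, bucket_any]
      cases h : pvTerms.any (fun t => t.toList.isPrefixOf (c :: rest)) with
      | false =>
          simp only [Bool.false_eq_true, if_false, ih]
          constructor
          · rintro ⟨t, ht, j, hp⟩; exact ⟨t, ht, j + 1, by simpa using hp⟩
          · rintro ⟨t, ht, j, hp⟩
            cases j with
            | zero =>
                exfalso
                have hf := List.any_eq_false.mp h t ht
                exact hf (List.isPrefixOf_iff_prefix.mpr (by simpa using hp))
            | succ j => exact ⟨t, ht, j, by simpa using hp⟩
      | true =>
          simp only [if_true, true_iff]
          obtain ⟨t, ht, hp⟩ := List.any_eq_true.mp h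
          exact ⟨t, ht, 0, by simpa using List.isPrefixOf_iff_prefix.mp hp⟩

-- 'a term matches at some position' is 'some term is a substring'
theorem pvBanned_eq (s : String) :
    pvBanned s.toList = pvTerms.any (fun t => PySem.Str.isIn t s) := by
  rw [Bool.eq_iff_iff, pvBanned_iff]
  simp only [List.any_eq_true]
  refine exists_congr fun t => and_congr_right fun ht => ?_
  rw [PySem.Str.isIn_iff_infix, ← PySem.Chars.isIn_iff_infix,
    ← PySem.Chars.exists_prefix_drop_iff_isIn]

-- A's break loop computes the negation of B's scan
theorem pvGoodLoop_eq (elem : String) :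
    pvGoodLoop pvTerms elem = !pvBanned elem.toList := by
  rw [pvBanned_eq]
  generalize pvTerms = ts
  induction ts with
  | nil => rfl
  | cons t ts ih =>
      simp only [pvGoodLoop, List.any_cons]
      cases PySem.Str.isIn t elem <;> simp [ih]

-- both loops are 'append the elements satisfying p'
theorem foldl_append_filter (p : String → Bool) (elems acc : List String) :
    elems.foldl (fun out elem => if p elem then out ++ [elem] else out) acc
    = acc ++ elems.filter p := by
  induction elems generalizing acc with
  | nil => simp
  | cons e es ih =>
    simp only [List.foldl_cons, List.filter_cons]
    by_cases h : p e = true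
    · rw [if_pos h, if_pos h, ih, List.append_assoc]; rfl
    · rw [if_neg h, if_neg h, ih]

-- ===== VERDICT (by name: the statement is the Claim_ definition above) =====
theorem checkMotion_spec : Claim_equal_checkMotion := by
  intro elems _
  unfold Spec_checkMotion checkMotion checkMotion_alt
  rw [foldl_append_filter (fun elem => pvGoodLoop pvTerms elem) elems [],
    foldl_append_filter (fun elem => !pvBanned elem.toList) elems []]
  exact congrArg _ (List.filter_congr fun x _ => pvGoodLoop_eq x)
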